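-- pv_equiv track=rewrite | github.com/adaezy/DynamicHFG-Modeling | main.py | sum_values
-- ===== SOURCE A (Python) =====
-- def sum_values(average_dict):
--     key_sums = {}
--     for key in average_dict:
--         for k, v in average_dict[key].items():
--             if k not in key_sums:
--                 key_sums[k] = 0
--             key_sums[k] += v
--     return key_sums
-- ===== SOURCE B (Python) =====
-- def sum_values(average_dict):
--     keys = dict.fromkeys(k for d in average_dict.values() for k in d)
--     return {k: sum(d[k] for d in average_dict.values() if k in d) for k in keys}
-- ===== Notes on version B (the rewrite author's own statement) =====
-- stated objective: alternative
-- what changed: B first collects the distinct inner keys (dict.fromkeys) and then builds the result with a per-key scan-and-sum comprehension over the inner dicts, instead of A's single mutating grouping pass over all entries.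
import Mathlib
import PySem

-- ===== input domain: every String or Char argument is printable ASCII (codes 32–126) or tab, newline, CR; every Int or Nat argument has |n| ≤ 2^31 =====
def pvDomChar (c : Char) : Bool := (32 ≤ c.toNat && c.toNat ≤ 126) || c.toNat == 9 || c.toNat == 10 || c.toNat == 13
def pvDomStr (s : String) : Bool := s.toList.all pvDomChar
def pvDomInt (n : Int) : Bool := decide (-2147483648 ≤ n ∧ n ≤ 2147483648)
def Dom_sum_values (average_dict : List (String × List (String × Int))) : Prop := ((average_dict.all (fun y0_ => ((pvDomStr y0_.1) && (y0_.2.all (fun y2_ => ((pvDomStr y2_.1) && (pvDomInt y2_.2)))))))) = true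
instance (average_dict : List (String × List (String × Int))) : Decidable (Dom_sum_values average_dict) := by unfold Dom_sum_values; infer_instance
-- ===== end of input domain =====

-- B replaces A's single mutating grouping pass by "collect the distinct inner keys, then
-- a per-key scan-and-sum over the inner dicts" (objective: alternative decomposition).

-- ===== PORT A =====
-- one step of A's inner loop body: `if k not in key_sums: key_sums[k] = 0; key_sums[k] += v`
def sumValuesStep (key_sums : PySem.Dict String Int) (q : String × Int) : PySem.Dict String Int :=
  let ks := if key_sums.contains q.1 then key_sums else key_sums.insert q.1 0
  ks.insert q.1 (ks.getD q.1 0 + q.2)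

-- `for key in average_dict: for k, v in average_dict[key].items(): …`; `average_dict[key]`
-- is the dict lookup (first match), exact under Pre_ (assoc lists that represent dicts).
def sum_values (average_dict : List (String × List (String × Int))) : List (String × Int) :=
  (average_dict.foldl
    (fun key_sums p => ((List.lookup p.1 average_dict).getD []).foldl sumValuesStep key_sums)
    PySem.Dict.empty).items

-- ===== PORT B =====
def sum_values_alt (average_dict : List (String × List (String × Int))) : List (String × Int) :=
  let keys := PySem.Set.ofList ((average_dict.map Prod.snd).flatMap (fun d => d.map Prod.fst))
  keys.map (fun k =>
    (k, ((average_dict.map Prod.snd).filterMap (fun d => List.lookup k d)).sum))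

-- ===== PRECONDITION & SPEC =====
-- Pre_ excludes association lists with duplicate keys (outer or inner): those do not
-- represent Python dicts, where keys are necessarily unique, so A never receives them.
def Pre_sum_values (average_dict : List (String × List (String × Int))) : Prop :=
  (average_dict.map Prod.fst).Nodup ∧
  ∀ d ∈ average_dict, (d.2.map Prod.fst).Nodup
instance (average_dict : List (String × List (String × Int))) : Decidable (Pre_sum_values average_dict) := by unfold Pre_sum_values; infer_instance

def pvWitness_sum_values : (List (String × List (String × Int))) :=
  [("mon", [("hf", 3), ("hg", 2)]), ("tue", [("hf", 4)])]

def Spec_sum_values (average_dict : List (String × List (String × Int))) (out : List (String × Int)) : Prop := out = sum_values_alt average_dict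
instance (average_dict : List (String × List (String × Int))) (out : List (String × Int)) : Decidable (Spec_sum_values average_dict out) := by unfold Spec_sum_values; infer_instance

-- ===== CLAIM (what is proved, stated in full; the proofs are below) =====
def Claim_equal_sum_values : Prop := ∀ (average_dict : List (String × List (String × Int))), Dom_sum_values average_dict → Pre_sum_values average_dict → Spec_sum_values average_dict (sum_values average_dict)

-- ===== LEMMAS AND PROOFS =====

-- A's loop body in `modify` form
def pvStep (d : PySem.Dict String Int) (q : String × Int) : PySem.Dict String Int :=
  d.modify q.1 0 (· + q.2)

theorem pv_step_eq (d : PySem.Dict String Int) (q : String × Int) :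
    sumValuesStep d q = pvStep d q := by
  by_cases h : d.contains q.1
  · simp [sumValuesStep, h, pvStep, PySem.Dict.modify]
  · have h0 : d.getD q.1 0 = 0 := by
      have h2 : d.get? q.1 = none := by rw [PySem.Dict.get?_eq_none_iff_contains]; simpa using h
      simp [PySem.Dict.getD, h2]
    simp [sumValuesStep, h, pvStep, PySem.Dict.modify, PySem.Dict.getD_insert_self,
      PySem.Dict.insert_insert_self, h0]

theorem pv_lookup_self {α β : Type} [BEq α] [LawfulBEq α] (l : List (α × β)) (p : α × β)
    (hnd : (l.map Prod.fst).Nodup) (hp : p ∈ l) : List.lookup p.1 l = some p.2 := by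
  induction l with
  | nil => cases hp
  | cons a t ih =>
    simp only [List.map_cons, List.nodup_cons] at hnd
    rcases List.mem_cons.mp hp with rfl | hm
    · simp [List.lookup]
    · have hne : p.1 ≠ a.1 := by
        intro h; exact hnd.1 (h ▸ List.mem_map.mpr ⟨p, hm, rfl⟩)
      have hb : (p.1 == a.1) = false := by simp [hne]
      simp [List.lookup, hb, ih hnd.2 hm]

theorem pv_foldl_nested {α β σ : Type} (l : List (α × List β)) (f : σ → β → σ) (init : σ) :
    l.foldl (fun s p => p.2.foldl f s) init = (l.flatMap Prod.snd).foldl f init := by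
  induction l generalizing init with
  | nil => rfl
  | cons a t ih => simp [List.foldl_append, ih]

theorem pv_getD_fold (ps : List (String × Int)) (d : PySem.Dict String Int) (k : String) :
    (ps.foldl pvStep d).getD k 0
      = d.getD k 0 + ((ps.filter (fun q => q.1 == k)).map Prod.snd).sum := by
  induction ps generalizing d with
  | nil => simp
  | cons q t ih =>
    simp only [List.foldl_cons, ih, List.filter_cons]
    rw [pvStep, PySem.Dict.getD_modify]
    by_cases h : q.1 = k
    · simp [h]; ring
    · simp [h, Ne.symm h]

theorem pv_sum_lookup (d : List (String × Int)) (k : String) (hnd : (d.map Prod.fst).Nodup) :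
    ((d.filter (fun q => q.1 == k)).map Prod.snd).sum = (List.lookup k d).getD 0 := by
  induction d with
  | nil => simp
  | cons a t ih =>
    simp only [List.map_cons, List.nodup_cons] at hnd
    by_cases h : a.1 = k
    · have hnil : t.filter (fun q => q.1 == k) = [] := by
        apply List.filter_eq_nil_iff.mpr
        intro q hq hbeq
        apply hnd.1
        have h1 : a.1 = q.1 := by rw [h]; exact (beq_iff_eq.mp hbeq).symm
        rw [h1]; exact List.mem_map.mpr ⟨q, hq, rfl⟩
      simp [List.lookup, h, hnil]
    · have hb : (k == a.1) = false := by simp [Ne.symm h]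
      have hb' : (a.1 == k) = false := by simp [h]
      simp [List.lookup, hb, hb', ih hnd.2]

theorem pv_filterMap_sum {α : Type} (l : List α) (g : α → Option Int) :
    (l.filterMap g).sum = (l.map (fun x => (g x).getD 0)).sum := by
  induction l with
  | nil => rfl
  | cons a t ih => cases h : g a <;> simp [h, ih]

theorem pv_sum_filter_flatten {α : Type} (l : List (List (α × Int))) (P : α × Int → Bool) :
    (((l.flatten).filter P).map Prod.snd).sum
      = (l.map (fun d => ((d.filter P).map Prod.snd).sum)).sum := by
  induction l with
  | nil => rfl
  | cons a t ih => simp [List.filter_append, List.map_append, Function.comp_def]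

theorem pv_main (average_dict : List (String × List (String × Int)))
    (hpre : Pre_sum_values average_dict) :
    sum_values average_dict = sum_values_alt average_dict := by
  obtain ⟨hout, hin⟩ := hpre
  -- the flattened list of all inner (key, value) pairs
  set ps : List (String × Int) := average_dict.flatMap Prod.snd with hps
  -- A: replace the dict lookup by the entry itself, then flatten the two loops
  have hA : sum_values average_dict = (ps.foldl pvStep PySem.Dict.empty).items := by
    unfold sum_values
    have hcongr := PySem.List.foldl_congr_mem
      (l := average_dict) (init := (PySem.Dict.empty : PySem.Dict String Int))
      (f := fun key_sums p => ((List.lookup p.1 average_dict).getD []).foldl sumValuesStep key_sums)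
      (g := fun ks p => p.2.foldl sumValuesStep ks)
      (by intro acc p hp; dsimp only; rw [pv_lookup_self average_dict p hout hp, Option.getD_some])
    rw [hcongr, pv_foldl_nested]
    have hstep : (sumValuesStep : PySem.Dict String Int → String × Int → PySem.Dict String Int)
        = pvStep := by funext d q; exact pv_step_eq d q
    rw [hstep, hps]
  -- the fold's result: keys are the distinct inner keys, values the filtered sums
  have hkeys : (ps.foldl pvStep PySem.Dict.empty).keys = PySem.Set.ofList (ps.map Prod.fst) := by
    rw [show pvStep = (fun (d : PySem.Dict String Int) (q : String × Int) =>
        d.modify q.1 0 (fun v => v + q.2)) from rfl]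
    rw [PySem.Dict.keys_foldl_modify_key]
    simp [PySem.Dict.keys_empty, PySem.Set.update_nil_left]
  have hnd : (ps.foldl pvStep PySem.Dict.empty).keys.Nodup := by
    rw [hkeys]; exact PySem.Set.nodup_ofList _
  have hitems : sum_values average_dict
      = (PySem.Set.ofList (ps.map Prod.fst)).map
          (fun k => (k, ((ps.filter (fun q => q.1 == k)).map Prod.snd).sum)) := by
    rw [hA, PySem.Dict.items_eq_map_keys _ hnd 0, hkeys]
    apply List.map_congr_left
    intro k _
    rw [pv_getD_fold]
    simp
  -- B: keys agree, and each per-key sum equals the filtered sum over the flattened pairs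
  rw [hitems]
  unfold sum_values_alt
  have hkeyseq : (average_dict.map Prod.snd).flatMap (fun d => d.map Prod.fst)
      = ps.map Prod.fst := by
    rw [hps]; simp [List.map_flatMap, List.flatMap_map]
  rw [hkeyseq]
  apply List.map_congr_left
  intro k _
  have hflat : ps = (average_dict.map Prod.snd).flatten := by
    rw [hps]; simp [List.flatMap_def]
  rw [pv_filterMap_sum, hflat, pv_sum_filter_flatten]
  congr 2
  apply List.map_congr_left
  intro d hd
  rcases List.mem_map.mp hd with ⟨p, hp, rfl⟩
  rw [pv_sum_lookup _ _ (hin p hp)]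

-- ===== VERDICT (by name: the statement is the Claim_ definition above) =====
theorem sum_values_spec : Claim_equal_sum_values := by
  intro ad _ hpre
  unfold Spec_sum_values
  exact pv_main ad hpre
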